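-- pv_equiv track=rewrite | github.com/khyunchoi/TIL | record_of_the_day/220729/test1.py | solution
-- ===== SOURCE A (Python) =====
-- def solution(k, m, names, amounts):
--     answer = 0
--
--     for i in range(len(names)):
--         flag_m = 0
--         if amounts[i] >= m:
--             flag_m = 1
--
--         flag_k = 0
--         if i >= k-1:
--             flag_k = 1
--             for j in range(i-k+1, i+1):
--                 if names[j].lower() != names[i].lower():
--                     flag_k = 0
--                     break
--
--         if flag_m or flag_k:
--             answer += 1
--
--     return answer
-- ===== SOURCE B (Python) =====
-- def solution(k, m, names, amounts):
--     answer = 0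
--     run = 0
--     prev = None
--     for name, amount in zip(names, amounts):
--         low = name.lower()
--         run = run + 1 if low == prev else 1
--         prev = low
--         if amount >= m or run >= k:
--             answer += 1
--     return answer
-- ===== Notes on version B (the rewrite author's own statement) =====
-- stated objective: faster
-- what changed: Replaces the inner O(k) rescan of the last k names at every index by an incrementally maintained run length of consecutive equal lowercased names (flag_k iff run >= k), in one pass over zip(names, amounts).
import Mathlib
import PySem

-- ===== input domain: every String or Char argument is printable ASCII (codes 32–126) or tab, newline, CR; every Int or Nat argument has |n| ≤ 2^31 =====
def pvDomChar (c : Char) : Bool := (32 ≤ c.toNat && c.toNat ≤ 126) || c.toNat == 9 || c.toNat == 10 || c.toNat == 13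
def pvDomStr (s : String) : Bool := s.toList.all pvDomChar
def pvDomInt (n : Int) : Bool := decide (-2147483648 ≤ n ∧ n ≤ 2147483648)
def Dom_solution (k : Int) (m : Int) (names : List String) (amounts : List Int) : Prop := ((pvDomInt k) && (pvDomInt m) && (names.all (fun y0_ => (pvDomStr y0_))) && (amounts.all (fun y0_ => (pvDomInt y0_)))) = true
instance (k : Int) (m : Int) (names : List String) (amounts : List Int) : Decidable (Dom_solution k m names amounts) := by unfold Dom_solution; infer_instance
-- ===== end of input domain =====

-- B replaces A's O(k) rescan of the last k names at every index by an incrementally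
-- maintained run length of consecutive equal lowercased names (objective: faster, O(n*k) → O(n)).

-- ===== PORT A =====
def solution (k : Int) (m : Int) (names : List String) (amounts : List Int) : Int :=
  (PySem.List.pyRange 0 (names.length : Int) 1).foldl
    (fun answer i =>
      let flag_m : Int := if m ≤ PySem.List.pyGetD amounts i 0 then 1 else 0
      let flag_k : Int :=
        if k - 1 ≤ i then
          (PySem.List.pyRange (i - k + 1) (i + 1) 1).foldl
            (fun fk j =>
              if PySem.Str.lower (PySem.List.pyGetD names j "") ≠
                 PySem.Str.lower (PySem.List.pyGetD names i "") then 0 else fk)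
            1
        else 0
      if flag_m ≠ 0 ∨ flag_k ≠ 0 then answer + 1 else answer)
    0

-- ===== PORT B =====
-- one loop step of Source B: state = (answer, run, prev)
def solutionAltStep (k : Int) (m : Int) (st : Int × Int × Option String) (p : String × Int) :
    Int × Int × Option String :=
  let low := PySem.Str.lower p.1
  let run : Int := if st.2.2 = some low then st.2.1 + 1 else 1
  ((if m ≤ p.2 ∨ k ≤ run then st.1 + 1 else st.1), run, some low)

def solution_alt (k : Int) (m : Int) (names : List String) (amounts : List Int) : Int :=
  ((names.zip amounts).foldl (solutionAltStep k m) (0, 0, none)).1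

-- ===== PRECONDITION & SPEC =====
-- A raises IndexError at amounts[i] when amounts is shorter than names; those inputs are excluded.
def Pre_solution (k : Int) (m : Int) (names : List String) (amounts : List Int) : Prop :=
  names.length ≤ amounts.length
instance (k : Int) (m : Int) (names : List String) (amounts : List Int) : Decidable (Pre_solution k m names amounts) := by unfold Pre_solution; infer_instance
def pvWitness_solution : Int × Int × List String × List Int := (2, 10, ["a", "A"], [5, 20])

def Spec_solution (k : Int) (m : Int) (names : List String) (amounts : List Int) (out : Int) : Prop := out = solution_alt k m names amounts
instance (k : Int) (m : Int) (names : List String) (amounts : List Int) (out : Int) : Decidable (Spec_solution k m names amounts out) := by unfold Spec_solution; infer_instance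

-- ===== CLAIM (what is proved, stated in full; the proofs are below) =====
def Claim_equal_solution : Prop := ∀ (k : Int) (m : Int) (names : List String) (amounts : List Int), Dom_solution k m names amounts → Pre_solution k m names amounts → Spec_solution k m names amounts (solution k m names amounts)

-- ===== LEMMAS AND PROOFS =====

-- run length of the constant suffix, computed on the reversed list
def runRev : List String → Int
  | [] => 0
  | x :: rest => 1 + ((rest.takeWhile (fun y => y == x)).length : Int)

def runOf (L : List String) : Int := runRev L.reverse

theorem runRev_cons (x : String) (rl : List String) :
    runRev (x :: rl) = if rl.head? = some x then runRev rl + 1 else 1 := by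
  cases rl with
  | nil => simp [runRev]
  | cons y rest =>
    by_cases h : y = x
    · subst h; simp [runRev, List.takeWhile_cons]; ring
    · have hb : (y == x) = false := by simp [h]
      simp [runRev, List.takeWhile_cons, hb, h]

theorem runOf_append (L : List String) (x : String) :
    runOf (L ++ [x]) = if L.getLast? = some x then runOf L + 1 else 1 := by
  simp only [runOf, List.reverse_append, List.reverse_cons, List.reverse_nil, List.nil_append,
    List.cons_append, List.nil_append]
  rw [runRev_cons, List.head?_reverse]

theorem runRev_nonneg (l : List String) : 0 ≤ runRev l := by
  cases l <;> simp [runRev] <;> positivity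

theorem one_le_runOf_append (L : List String) (x : String) : 1 ≤ runOf (L ++ [x]) := by
  rw [runOf_append]
  split
  · have := runRev_nonneg L.reverse; unfold runOf at *; omega
  · omega

theorem takeWhile_ge_iff {α : Type} (p : α → Bool) :
    ∀ (l : List α) (s : Nat),
      (s ≤ (l.takeWhile p).length ↔ s ≤ l.length ∧ ∀ t, (ht : t < l.length) → t < s → p l[t]) := by
  intro l
  induction l with
  | nil => intro s; simp
  | cons a l ih =>
    intro s
    cases s with
    | zero => simp
    | succ s =>
      by_cases hpa : p a
      · simp only [List.takeWhile_cons, hpa, if_true, List.length_cons, Nat.succ_le_succ_iff]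
        rw [ih s]
        constructor
        · rintro ⟨h1, h2⟩
          refine ⟨by omega, ?_⟩
          intro t ht hts
          cases t with
          | zero => simpa using hpa
          | succ t => simpa using h2 t (by omega) (by omega)
        · rintro ⟨h1, h2⟩
          refine ⟨by omega, ?_⟩
          intro t ht hts
          simpa using h2 (t + 1) (by omega) (by omega)
      · have hpa' : p a = false := by simpa using hpa
        simp only [List.takeWhile_cons, hpa', Bool.false_eq_true, if_false, List.length_nil,
          List.length_cons]
        constructor
        · omega
        · rintro ⟨h1, h2⟩
          have := h2 0 (by omega) (by omega)
          simp at this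
          exact absurd this hpa

-- the crux: A's "last k lowered names all equal the current one" test, at index L.length of
-- the lowered list L ++ [x], is exactly "run length ≥ k"
theorem crux (k : Int) (L : List String) (x : String) :
    ((k - 1 ≤ (L.length : Int)) ∧ ∀ j ∈ PySem.List.pyRange ((L.length : Int) - k + 1) ((L.length : Int) + 1) 1,
        PySem.List.pyGetD (L ++ [x]) j "" = x)
    ↔ k ≤ runOf (L ++ [x]) := by
  by_cases hk : k ≤ 0
  · have h1 : 1 ≤ runOf (L ++ [x]) := one_le_runOf_append L x
    have h0 : (0 : Int) ≤ (L.length : Int) := Int.natCast_nonneg _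
    constructor
    · intro _; omega
    · intro _
      refine ⟨by omega, ?_⟩
      intro j hj
      rw [PySem.List.mem_pyRange_one] at hj
      omega
  · have hk' : 0 < k := by omega
    have hx : runOf (L ++ [x]) = 1 + ((L.reverse.takeWhile (fun y => y == x)).length : Int) := by
      unfold runOf
      rw [List.reverse_append]
      simp [runRev]
    rw [hx]
    have hiff := takeWhile_ge_iff (fun y => y == x) L.reverse (k - 1).toNat
    constructor
    · rintro ⟨h1, h2⟩
      have hKt : (k - 1).toNat ≤ (L.reverse.takeWhile (fun y => y == x)).length := by
        rw [hiff]
        refine ⟨by simp; omega, ?_⟩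
        intro t ht hts
        have htlen : t < L.length := by simpa using ht
        rw [List.getElem_reverse]
        have hj := h2 ((L.length : Int) - 1 - t)
          (by rw [PySem.List.mem_pyRange_one]; omega)
        rw [PySem.List.pyGetD_eq_getElem _ _ (by omega) (by simp; omega)] at hj
        have hjt : ((L.length : Int) - 1 - t).toNat = L.length - 1 - t := by omega
        simp only [hjt] at hj
        rw [List.getElem_append_left (by omega)] at hj
        simpa [beq_iff_eq] using hj
      omega
    · intro h
      have hKt : (k - 1).toNat ≤ (L.reverse.takeWhile (fun y => y == x)).length := by omega
      rw [hiff] at hKt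
      obtain ⟨hKlen, hall⟩ := hKt
      have hKlen' : (k - 1).toNat ≤ L.length := by simpa using hKlen
      refine ⟨by omega, ?_⟩
      intro j hj
      rw [PySem.List.mem_pyRange_one] at hj
      obtain ⟨hj1, hj2⟩ := hj
      have hj0 : 0 ≤ j := by omega
      rw [PySem.List.pyGetD_eq_getElem _ _ hj0 (by simp; omega)]
      by_cases hje : j = (L.length : Int)
      · have : j.toNat = L.length := by omega
        simp only [this]
        exact List.getElem_concat_length rfl (by simp)
      · have hjlt : j.toNat < L.length := by omega
        rw [List.getElem_append_left hjlt]
        have ht := hall (L.length - 1 - j.toNat) (by simp; omega) (by omega)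
        rw [List.getElem_reverse] at ht
        have hidx : L.length - 1 - (L.length - 1 - j.toNat) = j.toNat := by omega
        simp only [hidx] at ht
        simpa [beq_iff_eq] using ht

-- the inner for-loop with break computes 0 iff some j in the range mismatches
theorem foldl_zero_flag {α : Type} (p : α → Prop) [DecidablePred p] :
    ∀ (l : List α) (a : Int),
      l.foldl (fun fk j => if p j then (0 : Int) else fk) a = if ∃ j ∈ l, p j then 0 else a := by
  intro l
  induction l with
  | nil => intro a; simp
  | cons b l ih =>
    intro a
    by_cases hb : p b
    · rw [List.foldl_cons, if_pos hb, ih, if_pos (⟨b, by simp, hb⟩ : ∃ j ∈ b :: l, p j)]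
      split_ifs <;> rfl
    · rw [List.foldl_cons, if_neg hb, ih]
      by_cases h : ∃ j ∈ l, p j
      · obtain ⟨j, hj, hpj⟩ := h
        rw [if_pos ⟨j, hj, hpj⟩, if_pos ⟨j, List.mem_cons_of_mem _ hj, hpj⟩]
      · rw [if_neg h, if_neg ?_]
        rintro ⟨j, hj, hpj⟩
        rcases List.mem_cons.1 hj with rfl | hj'
        · exact hb hpj
        · exact h ⟨j, hj', hpj⟩

-- A's per-index condition
abbrev pA (k m : Int) (names : List String) (amounts : List Int) (i : Int) : Prop :=
  m ≤ PySem.List.pyGetD amounts i 0 ∨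
    (k - 1 ≤ i ∧ ∀ j ∈ PySem.List.pyRange (i - k + 1) (i + 1) 1,
      PySem.Str.lower (PySem.List.pyGetD names j "") = PySem.Str.lower (PySem.List.pyGetD names i ""))

theorem solution_eq_countP (k m : Int) (names : List String) (amounts : List Int) :
    solution k m names amounts =
      ((List.range names.length).countP
        (fun (i : Nat) => decide (pA k m names amounts (i : Int))) : Int) := by
  unfold solution
  rw [PySem.List.pyRange_zero_natCast, List.foldl_map]
  rw [PySem.List.foldl_congr_mem _ _
    (fun answer (i : Nat) => if pA k m names amounts (i : Int) then answer + 1 else answer) _ ?_]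
  · rw [PySem.List.foldl_ite_add_one (fun i : Nat => pA k m names amounts (i : Int))]
    exact zero_add _
  · intro a i hi
    dsimp only
    rw [foldl_zero_flag (fun j => PySem.Str.lower (PySem.List.pyGetD names j "") ≠
        PySem.Str.lower (PySem.List.pyGetD names (i : Int) ""))]
    refine if_congr ?_ rfl rfl
    unfold pA
    constructor
    · rintro (h | h)
      · left
        by_cases hc : m ≤ PySem.List.pyGetD amounts (i : Int) 0
        · exact hc
        · rw [if_neg hc] at h
          exact absurd rfl h
      · right
        split_ifs at h with h1 h2
        · simp at h
        · push_neg at h2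
          exact ⟨h1, h2⟩
        · simp at h
    · rintro (h | ⟨h1, h2⟩)
      · left
        rw [if_pos h]
        exact one_ne_zero
      · right
        rw [if_pos h1, if_neg (by push_neg; exact h2)]
        simp

-- lowered first components
def lows (ps : List (String × Int)) : List String := ps.map (fun p => PySem.Str.lower p.1)

-- B's loop invariant, by induction from the right
theorem B_inv (k m : Int) :
    ∀ ps : List (String × Int),
      ps.foldl (solutionAltStep k m) (0, 0, none)
        = ( ((List.range ps.length).countP
              (fun i => decide (m ≤ (ps.getD i ("", 0)).2 ∨ k ≤ runOf ((lows ps).take (i + 1)))) : Int),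
            runOf (lows ps), (lows ps).getLast? ) := by
  intro ps
  induction ps using List.reverseRecOn with
  | nil => simp [lows, runOf, runRev]
  | append_singleton ps p ih =>
    rw [List.foldl_append, List.foldl_cons, List.foldl_nil, ih]
    unfold solutionAltStep
    dsimp only
    have hlows : lows (ps ++ [p]) = lows ps ++ [PySem.Str.lower p.1] := by simp [lows]
    have hrun : (if (lows ps).getLast? = some (PySem.Str.lower p.1) then runOf (lows ps) + 1 else 1)
        = runOf (lows (ps ++ [p])) := by rw [hlows, runOf_append]
    simp only [Prod.mk.injEq]
    refine ⟨?_, hrun, by rw [hlows]; exact List.getLast?_concat.symm⟩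
    rw [hrun]
    have hlen : (ps ++ [p]).length = ps.length + 1 := by simp
    rw [hlen, List.range_succ, List.countP_append]
    have h1 : List.countP
        (fun i => decide (m ≤ ((ps ++ [p]).getD i ("", 0)).2 ∨ k ≤ runOf ((lows (ps ++ [p])).take (i + 1))))
        (List.range ps.length)
        = List.countP
        (fun i => decide (m ≤ (ps.getD i ("", 0)).2 ∨ k ≤ runOf ((lows ps).take (i + 1))))
        (List.range ps.length) := by
      apply List.countP_congr
      intro i hi
      have hi' : i < ps.length := List.mem_range.mp hi
      simp only [decide_eq_true_eq]
      rw [List.getD_append ps [p] ("", 0) i hi', hlows,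
        List.take_append_of_le_length (by simp [lows]; omega)]
    rw [h1]
    have hgd : ((ps ++ [p]).getD ps.length ("", 0)) = p := by
      rw [List.getD_append_right ps [p] ("", 0) ps.length le_rfl]
      simp
    have htk : (lows (ps ++ [p])).take (ps.length + 1) = lows (ps ++ [p]) := by
      apply List.take_of_length_le
      simp [lows]
    have h2 : List.countP
        (fun i => decide (m ≤ ((ps ++ [p]).getD i ("", 0)).2 ∨ k ≤ runOf ((lows (ps ++ [p])).take (i + 1))))
        [ps.length]
        = if m ≤ p.2 ∨ k ≤ runOf (lows (ps ++ [p])) then 1 else 0 := by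
      rw [List.countP_cons, List.countP_nil, hgd, htk]
      simp only [decide_eq_true_eq, Nat.zero_add]
    rw [h2]
    split_ifs with h <;> push_cast <;> omega

theorem solution_spec : Claim_equal_solution := by
  intro k m names amounts _ hpre
  unfold Spec_solution solution_alt Pre_solution at *
  rw [B_inv]
  dsimp only
  rw [solution_eq_countP]
  have hzl : (names.zip amounts).length = names.length := by
    rw [List.length_zip]; omega
  rw [hzl]
  congr 1
  apply List.countP_congr
  intro i hi
  have hi' : i < names.length := List.mem_range.mp hi
  simp only [decide_eq_true_eq]
  have hlows : lows (names.zip amounts) = names.map PySem.Str.lower := by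
    unfold lows
    rw [show (fun (p : String × Int) => PySem.Str.lower p.1)
          = (PySem.Str.lower ∘ Prod.fst) from rfl]
    rw [← List.map_map, List.map_fst_zip hpre]
  have hamt : ((names.zip amounts).getD i ("", 0)).2 = PySem.List.pyGetD amounts (i : Int) 0 := by
    rw [PySem.List.pyGetD_natCast]
    rw [List.getD_eq_getElem _ _ (by rw [hzl]; exact hi'), List.getElem_zip,
      List.getD_eq_getElem _ _ (by omega)]
  rw [hamt]
  have hsome : (names.map PySem.Str.lower)[i]? = some (PySem.Str.lower names[i]) := by
    simp [hi']
  have htake : (lows (names.zip amounts)).take (i + 1)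
      = ((names.map PySem.Str.lower).take i) ++ [PySem.Str.lower names[i]] := by
    rw [hlows, List.take_succ, hsome]
    rfl
  rw [htake]
  have hLlen : ((names.map PySem.Str.lower).take i).length = i := by
    simp
    omega
  rw [← crux k ((names.map PySem.Str.lower).take i) (PySem.Str.lower names[i]), hLlen]
  refine or_congr Iff.rfl (and_congr_right fun h1 => ?_)
  have helem : ∀ j, j ∈ PySem.List.pyRange ((i : Int) - k + 1) ((i : Int) + 1) 1 →
      (PySem.Str.lower (PySem.List.pyGetD names j "") = PySem.Str.lower (PySem.List.pyGetD names (i : Int) "")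
        ↔ PySem.List.pyGetD (((names.map PySem.Str.lower).take i) ++ [PySem.Str.lower names[i]]) j ""
            = PySem.Str.lower names[i]) := by
    intro j hj
    rw [PySem.List.mem_pyRange_one] at hj
    by_cases hk : k ≤ 0
    · omega
    · have hj0 : 0 ≤ j := by omega
      have hni : PySem.List.pyGetD names (i : Int) "" = names[i] := by
        rw [PySem.List.pyGetD_natCast, List.getD_eq_getElem _ _ hi']
      have hnj : PySem.List.pyGetD names j "" = names[j.toNat] := by
        rw [PySem.List.pyGetD_eq_getElem _ _ hj0 (by omega)]
      have hlen2 : (((names.map PySem.Str.lower).take i) ++ [PySem.Str.lower names[i]]).length = i + 1 := by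
        simp
        omega
      have hL2 : PySem.List.pyGetD (((names.map PySem.Str.lower).take i) ++ [PySem.Str.lower names[i]]) j ""
          = (((names.map PySem.Str.lower).take i) ++ [PySem.Str.lower names[i]])[j.toNat]'(by omega) := by
        exact PySem.List.pyGetD_eq_getElem _ _ hj0 (by omega)
      rw [hni, hnj, hL2]
      by_cases hje : j.toNat = i
      · simp only [hje]
        rw [List.getElem_concat_length (by rw [hLlen]) (by omega)]
        simp
      · have hjlt : j.toNat < i := by omega
        rw [List.getElem_append_left (by omega), List.getElem_take, List.getElem_map]
  exact ⟨fun h j hj => (helem j hj).mp (h j hj), fun h j hj => (helem j hj).mpr (h j hj)⟩
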